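-- pv_equiv track=rewrite | github.com/JunweiL0-0/COMP90024-Project1 | src/util.py | is_in_gcc
-- ===== SOURCE A (Python) =====
-- def is_in_gcc(place_full_name, sal_list):
--     """
--     :param place_full_name: A string represent the name of the place
--     :param sal_list: [{gcc: place_names}]
--
--     Test the place_full_name against the sal_list.
--     Return true and the gcc_code if we found one. Return false and None if we hit the end of our records.
--     """
--     # We can predefind the gcc names here for later referencing. Except for 9oter
--     gcc = {'sydney':'1gsyd', 'melbourne':'2gmel', 'brisbane':'3gbri', 'adelaide':'4gade', 'perth':'5gper', 'hobart':'6ghob', 'darwin':'7gdar', 'canberra':'8acte'}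
--     # Split it into parts and remove all white spaces before and after to find the exact match
--     place_full_name = [x.strip() for x in place_full_name.lower().split(',')]
--     # if contains comma
--     if len(place_full_name) == 1:
--         # Retrieve the full name
--         place_full_name = place_full_name[0]
--         if place_full_name in gcc.keys():
--             # If its name is the greater captial city name
--             return (True, gcc[place_full_name])
--         else:
--             # Else we loop through the sal list to find a match
--             for gcc_code, sal_place in sal_list.items():
--                 if place_full_name in sal_place:
--                     # Return true and its code if there is a match
--                     return (True, gcc_code)
--             # Return false and None if we cant find one
--             return (False, None)
--     # If not contains comma
--     elif len(place_full_name) == 2: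
--         # Retrieve the full name
--         place_full_name1, place_full_name2 = place_full_name[0], place_full_name[1]
--         if place_full_name1 in gcc.keys():
--             # If its first part is the greater captial city name
--             return (True, gcc[place_full_name1])
--         elif place_full_name2 in gcc.keys():
--             # If its second part is the greater captial city name
--             return (True, gcc[place_full_name2])
--         else:
--             # Else we loop through the sal list to find a match
--             for gcc_code, sal_place in sal_list.items():
--                 if place_full_name1 in sal_place:
--                     return (True, gcc_code)
--                 elif place_full_name2 in sal_place:
--                     return (True, gcc_code)
--             return (False, None)
--     else:
--         return (False, None)
-- ===== SOURCE B (Python) =====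
-- def is_in_gcc(place_full_name, sal_list):
--     gcc = {'sydney': '1gsyd', 'melbourne': '2gmel', 'brisbane': '3gbri',
--            'adelaide': '4gade', 'perth': '5gper', 'hobart': '6ghob',
--            'darwin': '7gdar', 'canberra': '8acte'}
--     parts = [x.strip() for x in place_full_name.lower().split(',')]
--     if len(parts) > 2:
--         return (False, None)
--     for p in parts:
--         if p in gcc:
--             return (True, gcc[p])
--     # Invert sal_list once: place -> (entry position, gcc code), first occurrence kept.
--     index = {}
--     j = 0
--     for code, places in sal_list.items():
--         for place in places:
--             if place not in index:
--                 index[place] = (j, code)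
--         j += 1
--     hits = [index[p] for p in parts if p in index]
--     if hits:
--         return (True, min(hits)[1])
--     return (False, None)
-- ===== Notes on version B (the rewrite author's own statement) =====
-- stated objective: alternative
-- what changed: Replaces A's per-branch linear scans of sal_list (membership-testing each part inside every entry) by one inverted index place->(position, code) built once from sal_list, answering by dictionary lookup of the parts and taking the positionally minimal hit; the gcc branches collapse to one loop over parts.
import Mathlib
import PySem

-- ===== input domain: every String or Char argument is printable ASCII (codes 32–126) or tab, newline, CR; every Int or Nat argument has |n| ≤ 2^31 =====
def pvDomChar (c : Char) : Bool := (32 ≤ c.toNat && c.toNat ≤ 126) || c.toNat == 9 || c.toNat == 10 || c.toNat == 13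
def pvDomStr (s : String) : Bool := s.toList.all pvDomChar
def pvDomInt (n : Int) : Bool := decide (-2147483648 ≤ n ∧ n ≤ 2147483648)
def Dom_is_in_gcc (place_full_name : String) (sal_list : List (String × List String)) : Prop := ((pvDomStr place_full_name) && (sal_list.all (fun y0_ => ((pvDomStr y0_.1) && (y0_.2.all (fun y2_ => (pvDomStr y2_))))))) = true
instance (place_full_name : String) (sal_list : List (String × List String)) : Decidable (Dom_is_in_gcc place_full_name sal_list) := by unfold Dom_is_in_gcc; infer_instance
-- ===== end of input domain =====

-- B inverts sal_list once into a place -> (position, code) index and answers by lookup of the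
-- candidate parts, taking the positionally first hit, instead of A's branch-duplicated linear
-- scans of sal_list; objective: alternative (same asymptotic cost per single query).


-- the literal gcc dict both Pythons define
def pvGcc : PySem.Dict String String := PySem.Dict.ofList
  [("sydney", "1gsyd"), ("melbourne", "2gmel"), ("brisbane", "3gbri"), ("adelaide", "4gade"),
   ("perth", "5gper"), ("hobart", "6ghob"), ("darwin", "7gdar"), ("canberra", "8acte")]

-- ===== PORT A =====
-- A's len==1 inner loop over sal_list.items()
def pvLoopA1 (p : String) : List (String × List String) → Bool × Option String
  | [] => (false, none)
  | (code, places) :: rest =>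
      if places.contains p then (true, some code) else pvLoopA1 p rest

-- A's len==2 inner loop over sal_list.items()
def pvLoopA2 (p1 p2 : String) : List (String × List String) → Bool × Option String
  | [] => (false, none)
  | (code, places) :: rest =>
      if places.contains p1 then (true, some code)
      else if places.contains p2 then (true, some code)
      else pvLoopA2 p1 p2 rest

def is_in_gcc (place_full_name : String) (sal_list : List (String × List String)) : Bool × Option String :=
  let parts := ((PySem.Str.split? (PySem.Str.lower place_full_name) ",").getD []).map PySem.Str.strip
  match parts with
  | [p] =>
      -- gcc[p] is an exact lookup: under 'p in gcc.keys()' get? returns its value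
      if pvGcc.contains p then (true, pvGcc.get? p) else pvLoopA1 p sal_list
  | [p1, p2] =>
      if pvGcc.contains p1 then (true, pvGcc.get? p1)
      else if pvGcc.contains p2 then (true, pvGcc.get? p2)
      else pvLoopA2 p1 p2 sal_list
  | _ => (false, none)

-- ===== PORT B =====
-- 'for p in parts: if p in gcc: return (True, gcc[p])'
def pvFirstGcc : List String → Option String
  | [] => none
  | p :: ps => if pvGcc.contains p then pvGcc.get? p else pvFirstGcc ps

-- the inner 'for place in places: if place not in index: index[place] = (j, code)'
def pvAddPlaces (j : Int) (code : String) (d : PySem.Dict String (Int × String))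
    (places : List String) : PySem.Dict String (Int × String) :=
  places.foldl (fun d place => if d.contains place then d else d.insert place (j, code)) d

-- the outer 'for code, places in sal_list.items(): … ; j += 1'
def pvBuildIndex (j : Int) : List (String × List String) → PySem.Dict String (Int × String) →
    PySem.Dict String (Int × String)
  | [], d => d
  | (code, places) :: rest, d => pvBuildIndex (j + 1) rest (pvAddPlaces j code d places)

-- Python tuple '<' on (int, str), strict
def pvLexLt (a b : Int × String) : Bool := a.1 < b.1 || (a.1 == b.1 && a.2 < b.2)

-- min(hits): first minimal element of a nonempty list
def pvMinHits : List (Int × String) → Option (Int × String)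
  | [] => none
  | h :: t => some (t.foldl (fun m x => if pvLexLt x m then x else m) h)

def is_in_gcc_alt (place_full_name : String) (sal_list : List (String × List String)) : Bool × Option String :=
  let parts := ((PySem.Str.split? (PySem.Str.lower place_full_name) ",").getD []).map PySem.Str.strip
  if parts.length > 2 then (false, none)
  else
    match pvFirstGcc parts with
    | some v => (true, some v)
    | none =>
        let index := pvBuildIndex 0 sal_list PySem.Dict.empty
        let hits := parts.filterMap (fun p => index.get? p)
        match pvMinHits hits with
        | some m => (true, some m.2)
        | none => (false, none)

-- ===== PRECONDITION & SPEC =====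
def Spec_is_in_gcc (place_full_name : String) (sal_list : List (String × List String)) (out : Bool × Option String) : Prop := out = is_in_gcc_alt place_full_name sal_list
instance (place_full_name : String) (sal_list : List (String × List String)) (out : Bool × Option String) : Decidable (Spec_is_in_gcc place_full_name sal_list out) := by unfold Spec_is_in_gcc; infer_instance

-- ===== CLAIM =====
def Claim_equal_is_in_gcc : Prop := ∀ (place_full_name : String) (sal_list : List (String × List String)), Dom_is_in_gcc place_full_name sal_list → Spec_is_in_gcc place_full_name sal_list (is_in_gcc place_full_name sal_list)

-- ===== LEMMAS AND PROOFS =====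

-- first entry (from position j) whose place list contains p, with its position and code
def pvFind (j : Int) (p : String) : List (String × List String) → Option (Int × String)
  | [] => none
  | (code, places) :: rest => if places.contains p then some (j, code) else pvFind (j + 1) p rest

lemma pvFind_ge {j : Int} {p : String} {sal : List (String × List String)} {k : Int} {c : String}
    (h : pvFind j p sal = some (k, c)) : j ≤ k := by
  induction sal generalizing j with
  | nil => simp [pvFind] at h
  | cons hd tl ih =>
      obtain ⟨code, places⟩ := hd
      by_cases hc : p ∈ places
      · simp [pvFind, hc] at h; omega
      · simp only [pvFind, List.contains_eq_mem, hc, decide_false, Bool.false_eq_true, if_false] at h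
        have := ih h; omega

lemma get?_addPlaces (j : Int) (code : String) (d : PySem.Dict String (Int × String))
    (places : List String) (p : String) :
    (pvAddPlaces j code d places).get? p =
      ((d.get? p).orElse (fun _ => if places.contains p then some (j, code) else none)) := by
  induction places generalizing d with
  | nil => cases h : d.get? p <;> simp [pvAddPlaces, Option.orElse, h]
  | cons place rest ih =>
      simp only [pvAddPlaces, List.foldl_cons]
      by_cases hc : d.contains place = true
      · rw [if_pos hc]
        rw [show (rest.foldl (fun d place => if d.contains place then d else d.insert place (j, code)) d) = pvAddPlaces j code d rest from rfl, ih]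
        by_cases hp : p = place
        · subst hp
          have : (d.get? p).isSome := by rw [← PySem.Dict.contains_eq_isSome_get?]; exact hc
          obtain ⟨v, hv⟩ := Option.isSome_iff_exists.mp this
          simp [hv, Option.orElse]
        · cases h : d.get? p <;> simp [h, Option.orElse, hp]
      · rw [if_neg hc]
        rw [show (rest.foldl (fun d place => if d.contains place then d else d.insert place (j, code)) (d.insert place (j, code))) = pvAddPlaces j code (d.insert place (j, code)) rest from rfl, ih]
        by_cases hp : p = place
        · subst hp
          have hnone : d.get? p = none := by
            rw [PySem.Dict.get?_eq_none_iff_contains]; simpa using hc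
          simp [PySem.Dict.get?_insert, hnone, Option.orElse]
        · rw [PySem.Dict.get?_insert, if_neg hp]
          cases h : d.get? p <;> simp [h, Option.orElse, hp]

lemma get?_buildIndex (j : Int) (sal : List (String × List String))
    (d : PySem.Dict String (Int × String)) (p : String) :
    (pvBuildIndex j sal d).get? p = (d.get? p).orElse (fun _ => pvFind j p sal) := by
  induction sal generalizing j d with
  | nil => cases h : d.get? p <;> simp [pvBuildIndex, pvFind, Option.orElse, h]
  | cons hd tl ih =>
      obtain ⟨code, places⟩ := hd
      rw [show pvBuildIndex j ((code, places) :: tl) d = pvBuildIndex (j + 1) tl (pvAddPlaces j code d places) from rfl, ih, get?_addPlaces]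
      by_cases hc : p ∈ places <;>
        cases h : d.get? p <;> simp [pvFind, hc, h, Option.orElse]

lemma index_get? (sal : List (String × List String)) (p : String) :
    (pvBuildIndex 0 sal PySem.Dict.empty).get? p = pvFind 0 p sal := by
  rw [get?_buildIndex]; simp [Option.orElse]

lemma loopA1_eq (p : String) (j : Int) (sal : List (String × List String)) :
    pvLoopA1 p sal =
      (match pvMinHits (([p]).filterMap (fun q => pvFind j q sal)) with
       | some m => (true, some m.2)
       | none => (false, none)) := by
  induction sal generalizing j with
  | nil => simp [pvLoopA1, pvFind, pvMinHits]
  | cons hd tl ih =>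
      obtain ⟨code, places⟩ := hd
      by_cases hc : p ∈ places
      · simp [pvLoopA1, pvFind, hc, pvMinHits]
      · simp [pvLoopA1, pvFind, hc, ih (j + 1), List.filterMap_cons, List.filterMap_nil]

lemma loopA2_eq (p1 p2 : String) (j : Int) (sal : List (String × List String)) :
    pvLoopA2 p1 p2 sal =
      (match pvMinHits (([p1, p2]).filterMap (fun q => pvFind j q sal)) with
       | some m => (true, some m.2)
       | none => (false, none)) := by
  induction sal generalizing j with
  | nil => simp [pvLoopA2, pvFind, pvMinHits]
  | cons hd tl ih =>
      obtain ⟨code, places⟩ := hd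
      by_cases h1 : p1 ∈ places
      · -- pvFind j p1 = some (j, code)
        by_cases h2 : p2 ∈ places
        · simp [pvLoopA2, pvFind, h1, h2, pvMinHits, pvLexLt]
        · cases hf : pvFind (j + 1) p2 tl with
          | none => simp [pvLoopA2, pvFind, h1, h2, hf, pvMinHits]
          | some kc =>
              obtain ⟨k, c⟩ := kc
              have hk : j + 1 ≤ k := pvFind_ge hf
              have h3 : ¬(k < j) := by omega
              have h4 : ¬(k = j) := by omega
              simp [pvLoopA2, pvFind, h1, h2, hf, pvMinHits, pvLexLt, h3, h4]
      · by_cases h2 : p2 ∈ places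
        · cases hf : pvFind (j + 1) p1 tl with
          | none => simp [pvLoopA2, pvFind, h1, h2, hf, pvMinHits]
          | some kc =>
              obtain ⟨k, c⟩ := kc
              have hk : j + 1 ≤ k := pvFind_ge hf
              have h3 : j < k := by omega
              simp [pvLoopA2, pvFind, h1, h2, hf, pvMinHits, pvLexLt, h3]
        · simp [pvLoopA2, pvFind, h1, h2, ih (j + 1), List.filterMap_cons, List.filterMap_nil]

-- ===== VERDICT =====
theorem is_in_gcc_spec : Claim_equal_is_in_gcc := by
  intro place_full_name sal_list _
  unfold Spec_is_in_gcc is_in_gcc is_in_gcc_alt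
  generalize ((PySem.Str.split? (PySem.Str.lower place_full_name) ",").getD []).map PySem.Str.strip = parts
  match parts with
  | [] => simp [pvFirstGcc, pvMinHits]
  | [p] =>
      by_cases h : pvGcc.contains p = true
      · have hs : (pvGcc.get? p).isSome = true := by
          rw [← PySem.Dict.contains_eq_isSome_get?]; exact h
        obtain ⟨v, hv⟩ := Option.isSome_iff_exists.mp hs
        simp [pvFirstGcc, h, hv]
      · simp only [pvFirstGcc, h, if_false]
        simp only [List.length_cons, List.length_nil]
        rw [loopA1_eq p 0 sal_list]
        simp [index_get?]
  | [p1, p2] =>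
      by_cases h1 : pvGcc.contains p1 = true
      · have hs : (pvGcc.get? p1).isSome = true := by
          rw [← PySem.Dict.contains_eq_isSome_get?]; exact h1
        obtain ⟨v, hv⟩ := Option.isSome_iff_exists.mp hs
        simp [pvFirstGcc, h1, hv]
      · by_cases h2 : pvGcc.contains p2 = true
        · have hs : (pvGcc.get? p2).isSome = true := by
            rw [← PySem.Dict.contains_eq_isSome_get?]; exact h2
          obtain ⟨v, hv⟩ := Option.isSome_iff_exists.mp hs
          simp [pvFirstGcc, h1, h2, hv]
        · simp only [pvFirstGcc, h1, h2, if_false]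
          simp only [List.length_cons, List.length_nil]
          rw [loopA2_eq p1 p2 0 sal_list]
          simp [index_get?]
  | a :: b :: c :: rest => simp [pvFirstGcc]
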